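-- pv_equiv track=rewrite | github.com/jej29/public_http_agent | agent/agent/http/disclosure_enrichment.py | _is_low_value_stack_trace
-- ===== SOURCE A (Python) =====
-- from typing import Any, Dict, List
--
-- def _dedup(items: List[str]) -> List[str]:
--     out: List[str] = []
--     seen = set()
--     for item in items or []:
--         value = str(item or "").strip()
--         if not value or value in seen:
--             continue
--         seen.add(value)
--         out.append(value)
--     return out
--
-- def _clean_signal_evidence(items: List[str]) -> List[str]:
--     out: List[str] = []
--     for item in items or []:
--         value = str(item or "").replace("\ufffd", "").strip()
--         value = " ".join(value.split())
--         if not value: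
--             continue
--         out.append(value)
--     return _dedup(out)
--
-- def _is_low_value_stack_trace(items: List[str]) -> bool:
--     cleaned = _clean_signal_evidence(items)
--     if not cleaned:
--         return True
--     meaningful_markers = (" in /", " on line ", "traceback (most recent call last)", "caused by:", "#0 ", "stack trace:")
--     meaningful = [
--         item for item in cleaned
--         if any(marker in item.lower() for marker in meaningful_markers)
--         and not any(token in item.lower() for token in ("<span", "</span>", "color:", "&lt;span"))
--     ]
--     return not meaningful
-- ===== SOURCE B (Python) =====
-- def _is_low_value_stack_trace(items):
--     meaningful_markers = (" in /", " on line ", "traceback (most recent call last)", "caused by:", "#0 ", "stack trace:")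
--     noise_tokens = ("<span", "</span>", "color:", "&lt;span")
--     for item in items or []:
--         low = " ".join(str(item or "").replace("\ufffd", "").split()).lower()
--         if any(m in low for m in meaningful_markers) and not any(t in low for t in noise_tokens):
--             return False
--     return True
-- ===== Notes on version B (the rewrite author's own statement) =====
-- stated objective: simpler
-- what changed: Replaces the clean/dedup/filter three-list pipeline with a single early-exit pass over the items; the dedup step and the emptiness checks are dropped because they cannot affect the existence test.
import Mathlib
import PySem

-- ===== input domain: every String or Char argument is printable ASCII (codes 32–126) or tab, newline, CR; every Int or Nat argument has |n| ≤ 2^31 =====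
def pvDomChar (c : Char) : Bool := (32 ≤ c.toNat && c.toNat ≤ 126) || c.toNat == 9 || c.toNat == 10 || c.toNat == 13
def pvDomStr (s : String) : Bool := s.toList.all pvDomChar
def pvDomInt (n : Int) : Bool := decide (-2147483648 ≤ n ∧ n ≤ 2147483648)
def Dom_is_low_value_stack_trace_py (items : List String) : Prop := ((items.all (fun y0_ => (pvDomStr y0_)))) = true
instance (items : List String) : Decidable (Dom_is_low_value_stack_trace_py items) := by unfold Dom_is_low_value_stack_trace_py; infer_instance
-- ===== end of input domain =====

-- ===== PORT A =====
-- B replaces A's clean/dedup/filter pipeline with one early-exit pass (simpler; same return value).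
def pvMarkers : List String := [" in /", " on line ", "traceback (most recent call last)", "caused by:", "#0 ", "stack trace:"]
def pvTokens : List String := ["<span", "</span>", "color:", "&lt;span"]

-- _dedup: loop with `seen` set and `out` list
def pvDedupGo : List String → PySem.Set String → List String → List String
  | [], _, out => out
  | item :: rest, seen, out =>
      let value := PySem.Str.strip item          -- str(item or "") is the identity on str
      if value = "" ∨ value ∈ seen then pvDedupGo rest seen out
      else pvDedupGo rest (PySem.Set.add seen value) (out ++ [value])

def pvDedup (items : List String) : List String := pvDedupGo items (PySem.Set.ofList []) []

-- _clean_signal_evidence: cleaning loop, then _dedup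
def pvCleanGo : List String → List String → List String
  | [], out => out
  | item :: rest, out =>
      let value := PySem.Str.strip (PySem.Str.replace item "\uFFFD" "")
      let value := PySem.Str.join " " (PySem.Str.split₀ value)
      if value = "" then pvCleanGo rest out else pvCleanGo rest (out ++ [value])

def pvCleanSignalEvidence (items : List String) : List String := pvDedup (pvCleanGo items [])

def pvMeaningfulA (item : String) : Bool :=
  (pvMarkers.any (fun marker => PySem.Str.isIn marker (PySem.Str.lower item))) &&
  !(pvTokens.any (fun token => PySem.Str.isIn token (PySem.Str.lower item)))

def is_low_value_stack_trace_py (items : List String) : Bool :=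
  let cleaned := pvCleanSignalEvidence items
  if cleaned.isEmpty then true
  else
    let meaningful := cleaned.filter pvMeaningfulA
    meaningful.isEmpty

-- ===== PORT B =====
def pvAltGo : List String → Bool
  | [] => true
  | item :: rest =>
      let low := PySem.Str.lower (PySem.Str.join " " (PySem.Str.split₀ (PySem.Str.replace item "\uFFFD" "")))
      if (pvMarkers.any (fun m => PySem.Str.isIn m low)) && !(pvTokens.any (fun t => PySem.Str.isIn t low)) then false
      else pvAltGo rest

def is_low_value_stack_trace_py_alt (items : List String) : Bool := pvAltGo items

-- ===== PRECONDITION & SPEC =====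
def Spec_is_low_value_stack_trace_py (items : List String) (out : Bool) : Prop := out = is_low_value_stack_trace_py_alt items
instance (items : List String) (out : Bool) : Decidable (Spec_is_low_value_stack_trace_py items out) := by unfold Spec_is_low_value_stack_trace_py; infer_instance

-- ===== CLAIM (what is proved, stated in full; the proofs are below) =====
def Claim_equal_is_low_value_stack_trace_py : Prop := ∀ (items : List String), Dom_is_low_value_stack_trace_py items → Spec_is_low_value_stack_trace_py items (is_low_value_stack_trace_py items)

-- ===== LEMMAS AND PROOFS =====

-- the cleaned value B computes for one item (no redundant strip)
def pvCS (item : String) : String :=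
  PySem.Str.join " " (PySem.Str.split₀ (PySem.Str.replace item "\uFFFD" ""))

-- A's shape of the same value (with the redundant strip before split)
def pvCSA (item : String) : String :=
  PySem.Str.join " " (PySem.Str.split₀ (PySem.Str.strip (PySem.Str.replace item "\uFFFD" "")))

def pvP (item : String) : Bool := pvMeaningfulA (pvCS item)

-- intercalate unfolding equations (no library lemma closes these)
lemma pv_intercalate_cons_cons (sep a b : List Char) (l : List (List Char)) :
    List.intercalate sep (a :: b :: l) = a ++ sep ++ List.intercalate sep (b :: l) := by
  simp [List.intercalate, List.intersperse]

lemma pv_intercalate_singleton (sep a : List Char) : List.intercalate sep [a] = a := by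
  simp [List.intercalate, List.intersperse]

lemma pv_intercalate_append_singleton (sep : List Char) (xs : List (List Char)) (y : List Char) :
    List.intercalate sep (xs ++ [y]) =
      if xs = [] then y else List.intercalate sep xs ++ sep ++ y := by
  induction xs with
  | nil => simp [pv_intercalate_singleton]
  | cons x xs ih =>
      cases hxs : xs with
      | nil => simp [pv_intercalate_cons_cons, pv_intercalate_singleton]
      | cons z zs =>
          rw [hxs] at ih
          rw [show (x :: z :: zs ++ [y] : List (List Char)) = x :: z :: (zs ++ [y]) by simp,
              pv_intercalate_cons_cons,
              show (z :: (zs ++ [y]) : List (List Char)) = (z :: zs) ++ [y] by simp,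
              ih, if_neg (by simp), if_neg (by simp), pv_intercalate_cons_cons]
          simp [List.append_assoc]

lemma pv_reverse_intercalate (c : Char) (ws : List (List Char)) :
    (List.intercalate [c] ws).reverse = List.intercalate [c] ((ws.map List.reverse).reverse) := by
  induction ws with
  | nil => simp [List.intercalate]
  | cons a ws ih =>
      cases ws with
      | nil => simp [pv_intercalate_singleton]
      | cons b l =>
          rw [pv_intercalate_cons_cons,
              show ((List.map List.reverse (a :: b :: l)).reverse : List (List Char))
                = (List.map List.reverse (b :: l)).reverse ++ [a.reverse] by simp,
              pv_intercalate_append_singleton, if_neg (by simp), ← ih]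
          simp [List.reverse_append, List.append_assoc]

-- words property: every word of split₀ is nonempty and space-free
lemma pv_go_words (s : List Char) (cur : List Char) (acc : List (List Char))
    (hcur : ∀ c ∈ cur, PySem.Chars.isspace c = false)
    (hacc : ∀ w ∈ acc, w ≠ [] ∧ ∀ c ∈ w, PySem.Chars.isspace c = false) :
    ∀ w ∈ PySem.Chars.split₀.go s cur acc, w ≠ [] ∧ ∀ c ∈ w, PySem.Chars.isspace c = false := by
  induction s generalizing cur acc with
  | nil =>
      intro w hw
      by_cases h : cur = []
      · subst h; exact hacc w (by simpa [PySem.Chars.split₀.go] using hw)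
      · have hw' : w ∈ acc ∨ w = cur.reverse := by
          simpa [PySem.Chars.split₀.go, List.isEmpty_iff, h] using hw
        rcases hw' with h1 | rfl
        · exact hacc w h1
        · exact ⟨by simpa using h, fun d hd => hcur d (by simpa using hd)⟩
  | cons c rest ih =>
      intro w hw
      by_cases hs : PySem.Chars.isspace c = true
      · by_cases h : cur = []
        · subst h
          exact ih [] acc (by simp) hacc w (by simpa [PySem.Chars.split₀.go, hs] using hw)
        · refine ih [] (cur.reverse :: acc) (by simp) ?_ w
            (by simpa [PySem.Chars.split₀.go, hs, List.isEmpty_iff, h] using hw)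
          intro v hv
          rcases List.mem_cons.mp hv with rfl | h1
          · exact ⟨by simpa using h, fun d hd => hcur d (by simpa using hd)⟩
          · exact hacc v h1
      · have hs' : PySem.Chars.isspace c = false := by simpa using hs
        refine ih (c :: cur) acc ?_ hacc w (by simpa [PySem.Chars.split₀.go, hs'] using hw)
        intro d hd
        rcases List.mem_cons.mp hd with rfl | h1
        · exact hs'
        · exact hcur d h1

lemma pv_split₀_words (s : List Char) :
    ∀ w ∈ PySem.Chars.split₀ s, w ≠ [] ∧ ∀ c ∈ w, PySem.Chars.isspace c = false := by
  simpa [PySem.Chars.split₀] using pv_go_words s [] [] (by simp) (by simp)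

lemma pv_lstrip_intercalate (ws : List (List Char))
    (h : ∀ w ∈ ws, w ≠ [] ∧ ∀ c ∈ w, PySem.Chars.isspace c = false) :
    List.dropWhile PySem.Chars.isspace (List.intercalate [' '] ws) = List.intercalate [' '] ws := by
  cases ws with
  | nil => simp [List.intercalate]
  | cons w l =>
      obtain ⟨hne, hsp⟩ := h w (by simp)
      obtain ⟨c, w', rfl⟩ := List.exists_cons_of_ne_nil hne
      have hc : PySem.Chars.isspace c = false := hsp c (by simp)
      cases l with
      | nil => rw [pv_intercalate_singleton]; simp [hc]
      | cons b l' => rw [pv_intercalate_cons_cons]; simp [hc]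

lemma pv_strip_intercalate (ws : List (List Char))
    (h : ∀ w ∈ ws, w ≠ [] ∧ ∀ c ∈ w, PySem.Chars.isspace c = false) :
    PySem.Chars.strip (List.intercalate [' '] ws) = List.intercalate [' '] ws := by
  have h' : ∀ w ∈ (ws.map List.reverse).reverse, w ≠ [] ∧ ∀ c ∈ w, PySem.Chars.isspace c = false := by
    intro w hw
    simp only [List.mem_reverse, List.mem_map] at hw
    obtain ⟨v, hv, rfl⟩ := hw
    obtain ⟨h1, h2⟩ := h v hv
    exact ⟨by simpa using h1, fun c hc => h2 c (by simpa using hc)⟩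
  simp only [PySem.Chars.strip, PySem.Chars.lstrip, PySem.Chars.rstrip]
  rw [pv_lstrip_intercalate ws h, pv_reverse_intercalate, pv_lstrip_intercalate _ h',
      ← pv_reverse_intercalate, List.reverse_reverse]

-- Str-level: the cleaned value is strip-invariant
lemma pv_strip_join_split₀ (s : String) :
    PySem.Str.strip (PySem.Str.join " " (PySem.Str.split₀ s)) =
      PySem.Str.join " " (PySem.Str.split₀ s) := by
  simp only [PySem.Str.strip, PySem.Str.join, PySem.Str.split₀, PySem.Chars.join,
    String.toList_ofList, List.map_map]
  rw [show (List.map (String.toList ∘ String.ofList) (PySem.Chars.split₀ s.toList))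
        = PySem.Chars.split₀ s.toList by
      rw [show (String.toList ∘ String.ofList) = fun l => l from
            funext (fun l => String.toList_ofList (l := l))]
      exact List.map_id _,
      show (" ".toList) = [' '] from rfl,
      pv_strip_intercalate _ (pv_split₀_words s.toList)]

-- split₀ ignores stripping of its argument
lemma pv_go_allspace (t : List Char) (cur : List Char) (acc : List (List Char))
    (h : ∀ c ∈ t, PySem.Chars.isspace c = true) :
    PySem.Chars.split₀.go t cur acc = PySem.Chars.split₀.go [] cur acc := by
  induction t generalizing cur acc with
  | nil => rfl
  | cons c rest ih =>
      have hc : PySem.Chars.isspace c = true := h c (by simp)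
      have hrest : ∀ d ∈ rest, PySem.Chars.isspace d = true :=
        fun d hd => h d (List.mem_cons_of_mem c hd)
      by_cases hcur : cur = []
      · subst hcur
        rw [show PySem.Chars.split₀.go (c :: rest) [] acc = PySem.Chars.split₀.go rest [] acc
              by simp [PySem.Chars.split₀.go, hc],
            ih [] acc hrest]
      · rw [show PySem.Chars.split₀.go (c :: rest) cur acc
              = PySem.Chars.split₀.go rest [] (cur.reverse :: acc)
              by simp [PySem.Chars.split₀.go, hc, List.isEmpty_iff, hcur],
            ih [] _ hrest]
        simp [PySem.Chars.split₀.go, List.isEmpty_iff, hcur]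

lemma pv_go_append_spaces (s t : List Char) (cur : List Char) (acc : List (List Char))
    (h : ∀ c ∈ t, PySem.Chars.isspace c = true) :
    PySem.Chars.split₀.go (s ++ t) cur acc = PySem.Chars.split₀.go s cur acc := by
  induction s generalizing cur acc with
  | nil => simpa using pv_go_allspace t cur acc h
  | cons c rest ih =>
      by_cases hs : PySem.Chars.isspace c = true
      · by_cases hcur : cur = []
        · subst hcur
          rw [show ((c :: rest) ++ t : List Char) = c :: (rest ++ t) by simp]
          simp only [PySem.Chars.split₀.go, hs, if_true, List.isEmpty_nil]
          exact ih [] acc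
        · rw [show ((c :: rest) ++ t : List Char) = c :: (rest ++ t) by simp]
          simp only [PySem.Chars.split₀.go, hs, if_true, List.isEmpty_iff, hcur, if_neg]
          exact ih [] (cur.reverse :: acc)
      · have hs' : PySem.Chars.isspace c = false := by simpa using hs
        rw [show ((c :: rest) ++ t : List Char) = c :: (rest ++ t) by simp]
        simp only [PySem.Chars.split₀.go, hs', Bool.false_eq_true, if_false]
        exact ih (c :: cur) acc

lemma pv_split₀_rstrip (x : List Char) :
    PySem.Chars.split₀ (PySem.Chars.rstrip x) = PySem.Chars.split₀ x := by
  have hdec : PySem.Chars.rstrip x ++ (List.takeWhile PySem.Chars.isspace x.reverse).reverse = x := by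
    simp only [PySem.Chars.rstrip]
    rw [← List.reverse_append, List.takeWhile_append_dropWhile, List.reverse_reverse]
  have hsp : ∀ c ∈ (List.takeWhile PySem.Chars.isspace x.reverse).reverse,
      PySem.Chars.isspace c = true := by
    intro c hc
    exact List.mem_takeWhile_imp (by simpa using hc)
  conv_rhs => rw [← hdec]
  simp only [PySem.Chars.split₀]
  rw [pv_go_append_spaces _ _ _ _ hsp]

lemma pv_go_dropWhile (x : List Char) (acc : List (List Char)) :
    PySem.Chars.split₀.go (List.dropWhile PySem.Chars.isspace x) [] acc
      = PySem.Chars.split₀.go x [] acc := by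
  induction x generalizing acc with
  | nil => rfl
  | cons c rest ih =>
      by_cases hs : PySem.Chars.isspace c = true
      · rw [List.dropWhile_cons_of_pos hs]
        simp only [PySem.Chars.split₀.go, hs, if_true, List.isEmpty_nil]
        exact ih acc
      · rw [List.dropWhile_cons_of_neg (by simpa using hs)]

lemma pv_split₀_strip (x : List Char) :
    PySem.Chars.split₀ (PySem.Chars.strip x) = PySem.Chars.split₀ x := by
  simp only [PySem.Chars.strip]
  rw [pv_split₀_rstrip]
  simp only [PySem.Chars.lstrip, PySem.Chars.split₀]
  exact pv_go_dropWhile x []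

lemma pv_csa_eq_cs (item : String) : pvCSA item = pvCS item := by
  simp only [pvCSA, pvCS, PySem.Str.split₀, PySem.Str.strip, String.toList_ofList]
  rw [pv_split₀_strip]

lemma pv_strip_csa (item : String) : PySem.Str.strip (pvCSA item) = pvCSA item := by
  simpa only [pvCSA] using
    pv_strip_join_split₀ (PySem.Str.strip (PySem.Str.replace item "\uFFFD" ""))

-- membership in the cleaning loop's accumulator
lemma pv_mem_cleanGo (l : List String) (out : List String) (x : String) :
    x ∈ pvCleanGo l out ↔ x ∈ out ∨ ∃ it ∈ l, pvCSA it = x ∧ x ≠ "" := by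
  induction l generalizing out with
  | nil => simp [pvCleanGo]
  | cons it rest ih =>
      show x ∈ (if pvCSA it = "" then pvCleanGo rest out
          else pvCleanGo rest (out ++ [pvCSA it])) ↔ _
      by_cases h : pvCSA it = ""
      · rw [if_pos h, ih]
        constructor
        · rintro (h1 | ⟨v, hv, h2, h3⟩)
          · exact Or.inl h1
          · exact Or.inr ⟨v, List.mem_cons_of_mem it hv, h2, h3⟩
        · rintro (h1 | ⟨v, hv, h2, h3⟩)
          · exact Or.inl h1
          · rcases List.mem_cons.mp hv with rfl | hv'
            · exact absurd (h2 ▸ h) h3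
            · exact Or.inr ⟨v, hv', h2, h3⟩
      · rw [if_neg h, ih]
        constructor
        · rintro (h1 | ⟨v, hv, h2, h3⟩)
          · rcases List.mem_append.mp h1 with h2 | h2
            · exact Or.inl h2
            · have hx : x = pvCSA it := List.mem_singleton.mp h2
              exact Or.inr ⟨it, List.mem_cons_self, hx.symm, by rw [hx]; exact h⟩
          · exact Or.inr ⟨v, List.mem_cons_of_mem it hv, h2, h3⟩
        · rintro (h1 | ⟨v, hv, h2, h3⟩)
          · exact Or.inl (List.mem_append_left _ h1)
          · rcases List.mem_cons.mp hv with rfl | hv'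
            · exact Or.inl (by rw [← h2]; exact List.mem_append_right _ (by simp))
            · exact Or.inr ⟨v, hv', h2, h3⟩

-- membership in dedup, given seen and out hold the same values
lemma pv_mem_dedupGo (l : List String) (seen : PySem.Set String) (out : List String)
    (hinv : ∀ v : String, v ∈ seen ↔ v ∈ out) (x : String) :
    x ∈ pvDedupGo l seen out ↔ x ∈ out ∨ ∃ v ∈ l, PySem.Str.strip v = x ∧ x ≠ "" := by
  induction l generalizing seen out with
  | nil => simp [pvDedupGo]
  | cons it rest ih =>
      show x ∈ (if PySem.Str.strip it = "" ∨ PySem.Str.strip it ∈ seen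
          then pvDedupGo rest seen out
          else pvDedupGo rest (PySem.Set.add seen (PySem.Str.strip it))
            (out ++ [PySem.Str.strip it])) ↔ _
      by_cases h : PySem.Str.strip it = "" ∨ PySem.Str.strip it ∈ seen
      · rw [if_pos h, ih seen out hinv]
        constructor
        · rintro (h1 | ⟨v, hv, h2, h3⟩)
          · exact Or.inl h1
          · exact Or.inr ⟨v, List.mem_cons_of_mem it hv, h2, h3⟩
        · rintro (h1 | ⟨v, hv, h2, h3⟩)
          · exact Or.inl h1
          · rcases List.mem_cons.mp hv with rfl | hv'
            · rcases h with h | h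
              · exact absurd (h2 ▸ h) h3
              · exact Or.inl (h2 ▸ (hinv _).mp h)
            · exact Or.inr ⟨v, hv', h2, h3⟩
      · push_neg at h
        obtain ⟨hne, hns⟩ := h
        rw [if_neg (by push_neg; exact ⟨hne, hns⟩)]
        rw [ih _ _ (by
          intro v
          rw [PySem.Set.mem_add, hinv v]
          simp [List.mem_append])]
        constructor
        · rintro (h1 | ⟨v, hv, h2, h3⟩)
          · rcases List.mem_append.mp h1 with h2 | h2
            · exact Or.inl h2
            · have hx : x = PySem.Str.strip it := List.mem_singleton.mp h2
              exact Or.inr ⟨it, List.mem_cons_self, hx.symm, by rw [hx] at *; exact hne⟩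
          · exact Or.inr ⟨v, List.mem_cons_of_mem it hv, h2, h3⟩
        · rintro (h1 | ⟨v, hv, h2, h3⟩)
          · exact Or.inl (List.mem_append_left _ h1)
          · rcases List.mem_cons.mp hv with rfl | hv'
            · exact Or.inl (by rw [← h2]; exact List.mem_append_right _ (by simp))
            · exact Or.inr ⟨v, hv', h2, h3⟩

lemma pv_meaningful_empty : pvMeaningfulA "" = false := by decide

lemma pv_alt_eq_not_any (l : List String) : pvAltGo l = !(l.any pvP) := by
  induction l with
  | nil => rfl
  | cons it rest ih =>
      show (if pvP it = true then false else pvAltGo rest) = _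
      by_cases h : pvP it = true
      · simp [h]
      · simp only [List.any_cons]
        rw [if_neg h, ih]
        simp [Bool.eq_false_iff.mpr h]

lemma pv_any_eq (items : List String) :
    (pvCleanSignalEvidence items).any pvMeaningfulA = items.any pvP := by
  rw [Bool.eq_iff_iff]
  simp only [List.any_eq_true]
  constructor
  · rintro ⟨x, hx, hpx⟩
    rw [pvCleanSignalEvidence, pvDedup,
      pv_mem_dedupGo _ _ _ (by intro v; simp) x] at hx
    rcases hx with h1 | ⟨v, hv, h2, h3⟩
    · simp at h1
    · rw [pv_mem_cleanGo] at hv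
      rcases hv with h4 | ⟨it, hit, h5, h6⟩
      · simp at h4
      · refine ⟨it, hit, ?_⟩
        have hxcs : x = pvCS it := by rw [← h2, ← h5, pv_strip_csa, pv_csa_eq_cs]
        rw [pvP, ← hxcs]
        exact hpx
  · rintro ⟨it, hit, hp⟩
    have hne : pvCS it ≠ "" := by
      intro h; rw [pvP, h, pv_meaningful_empty] at hp; exact Bool.false_ne_true hp
    refine ⟨pvCS it, ?_, hp⟩
    rw [pvCleanSignalEvidence, pvDedup,
      pv_mem_dedupGo _ _ _ (by intro v; simp)]
    refine Or.inr ⟨pvCSA it, ?_, ?_, hne⟩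
    · rw [pv_mem_cleanGo]
      exact Or.inr ⟨it, hit, rfl, by rwa [pv_csa_eq_cs]⟩
    · rw [pv_strip_csa, pv_csa_eq_cs]

lemma pv_if_empty (l : List String) (p : String → Bool) :
    (if l.isEmpty then true else (l.filter p).isEmpty) = !(l.any p) := by
  cases l with
  | nil => rfl
  | cons x xs =>
      cases h : (x :: xs).any p
      · rw [List.any_eq_false] at h
        have hfil : (x :: xs).filter p = [] := List.filter_eq_nil_iff.mpr h
        simp [hfil]
      · obtain ⟨a, ha, hpa⟩ := List.any_eq_true.mp h
        have hne : (x :: xs).filter p ≠ [] := by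
          simp only [ne_eq, List.filter_eq_nil_iff, not_forall]
          exact ⟨a, ha, by simp [hpa]⟩
        simp [hne]

lemma pv_a_eq (items : List String) :
    is_low_value_stack_trace_py items = !((pvCleanSignalEvidence items).any pvMeaningfulA) := by
  show (if (pvCleanSignalEvidence items).isEmpty then true
    else ((pvCleanSignalEvidence items).filter pvMeaningfulA).isEmpty) = _
  exact pv_if_empty _ _

-- ===== VERDICT (by name: the statement is the Claim_ definition above) =====
theorem is_low_value_stack_trace_py_spec : Claim_equal_is_low_value_stack_trace_py := by
  intro items _
  show is_low_value_stack_trace_py items = is_low_value_stack_trace_py_alt items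
  rw [pv_a_eq, pv_any_eq, is_low_value_stack_trace_py_alt, pv_alt_eq_not_any]
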